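-- pv_equiv track=rewrite | github.com/YoneRai12/YonerAI | src/cogs/handlers/tool_selector.py | _derive_function_category
-- ===== SOURCE A (Python) =====
-- from typing import List, Dict, Any, Optional
--
-- def _derive_function_category(selected_categories: List[str]) -> str:
--     cats = [str(c or "").strip().upper() for c in selected_categories]
--     if "MEDIA_ANALYZE" in cats:
--         return "vision"
--     if "CODEBASE" in cats:
--         return "coding"
--     if "DISCORD_SERVER" in cats:
--         return "admin"
--     if "WEB_FETCH" in cats or "WEB_READ" in cats:
--         return "retrieval"
--     if "VOICE_AUDIO" in cats:
--         return "voice"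
--     if "MCP" in cats:
--         return "ops"
--     return "chat"
-- ===== SOURCE B (Python) =====
-- _PRIORITY = {
--     "MEDIA_ANALYZE": (0, "vision"),
--     "CODEBASE": (1, "coding"),
--     "DISCORD_SERVER": (2, "admin"),
--     "WEB_FETCH": (3, "retrieval"),
--     "WEB_READ": (3, "retrieval"),
--     "VOICE_AUDIO": (4, "voice"),
--     "MCP": (5, "ops"),
-- }
--
--
-- def _derive_function_category(selected_categories):
--     best = (7, "chat")
--     for c in selected_categories:
--         hit = _PRIORITY.get(str(c or "").strip().upper())
--         if hit is not None and hit[0] < best[0]: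
--             best = hit
--     return best[1]
-- ===== Notes on version B (the rewrite author's own statement) =====
-- stated objective: alternative
-- what changed: Replaced the chain of six keyword membership tests over the normalized category list by a single pass over the input that looks each normalized category up in a priority dictionary and keeps the minimum-priority hit in an accumulator.
import Mathlib
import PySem

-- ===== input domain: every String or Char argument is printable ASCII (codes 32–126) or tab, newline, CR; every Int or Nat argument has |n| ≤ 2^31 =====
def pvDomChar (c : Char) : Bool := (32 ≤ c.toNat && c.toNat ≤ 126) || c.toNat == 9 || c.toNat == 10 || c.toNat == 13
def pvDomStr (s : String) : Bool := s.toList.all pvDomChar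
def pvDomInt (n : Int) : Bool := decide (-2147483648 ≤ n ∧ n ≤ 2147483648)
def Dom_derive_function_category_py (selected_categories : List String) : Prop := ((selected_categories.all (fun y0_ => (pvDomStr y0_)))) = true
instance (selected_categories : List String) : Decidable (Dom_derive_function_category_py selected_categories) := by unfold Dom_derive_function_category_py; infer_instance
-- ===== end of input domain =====

-- B replaces A's chain of six membership tests over the normalized list by a single
-- pass over the input keeping the minimum-priority dictionary hit (alternative).

-- str(c or "").strip().upper(): 'c or ""' is c unless c is empty, then "" (same expression in both sources)
def pvNorm (c : String) : String :=
  PySem.Str.upper (PySem.Str.strip (if c = "" then "" else c))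

-- ===== PORT A =====
def derive_function_category_py (selected_categories : List String) : String :=
  let cats := selected_categories.map pvNorm
  if cats.contains "MEDIA_ANALYZE" then "vision"
  else if cats.contains "CODEBASE" then "coding"
  else if cats.contains "DISCORD_SERVER" then "admin"
  else if cats.contains "WEB_FETCH" || cats.contains "WEB_READ" then "retrieval"
  else if cats.contains "VOICE_AUDIO" then "voice"
  else if cats.contains "MCP" then "ops"
  else "chat"

-- ===== PORT B =====
-- the module-level dict literal _PRIORITY (distinct keys, insertion order)
def pvPriorityDict : PySem.Dict String (Int × String) :=
  PySem.Dict.mk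
    [ ("MEDIA_ANALYZE", (0, "vision"))
    , ("CODEBASE", (1, "coding"))
    , ("DISCORD_SERVER", (2, "admin"))
    , ("WEB_FETCH", (3, "retrieval"))
    , ("WEB_READ", (3, "retrieval"))
    , ("VOICE_AUDIO", (4, "voice"))
    , ("MCP", (5, "ops")) ]

def derive_function_category_py_alt (selected_categories : List String) : String :=
  (selected_categories.foldl
    (fun best c =>
      match pvPriorityDict.get? (pvNorm c) with
      | none => best
      | some hit => if hit.1 < best.1 then hit else best)
    ((7 : Int), "chat")).2

-- ===== PRECONDITION & SPEC =====
def Spec_derive_function_category_py (selected_categories : List String) (out : String) : Prop := out = derive_function_category_py_alt selected_categories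
instance (selected_categories : List String) (out : String) : Decidable (Spec_derive_function_category_py selected_categories out) := by unfold Spec_derive_function_category_py; infer_instance

-- ===== CLAIM (what is proved, stated in full; the proofs are below) =====
def Claim_equal_derive_function_category_py : Prop := ∀ (selected_categories : List String), Dom_derive_function_category_py selected_categories → Spec_derive_function_category_py selected_categories (derive_function_category_py selected_categories)

-- ===== LEMMAS AND PROOFS =====

-- priority of a (normalized) category string; 7 = no keyword
def pvPrio (s : String) : Int :=
  if s = "MEDIA_ANALYZE" then 0
  else if s = "CODEBASE" then 1
  else if s = "DISCORD_SERVER" then 2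
  else if s = "WEB_FETCH" then 3
  else if s = "WEB_READ" then 3
  else if s = "VOICE_AUDIO" then 4
  else if s = "MCP" then 5
  else 7

-- label of a priority
def pvLbl (p : Int) : String :=
  if p = 0 then "vision"
  else if p = 1 then "coding"
  else if p = 2 then "admin"
  else if p = 3 then "retrieval"
  else if p = 4 then "voice"
  else if p = 5 then "ops"
  else "chat"

theorem pvPrio_bounds (s : String) : 0 ≤ pvPrio s ∧ pvPrio s ≤ 7 := by
  unfold pvPrio; split_ifs <;> norm_num

theorem pvPrio_cases (s : String) :
    pvPrio s = 7 ∨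
    (pvPrio s = 0 ∧ s = "MEDIA_ANALYZE") ∨
    (pvPrio s = 1 ∧ s = "CODEBASE") ∨
    (pvPrio s = 2 ∧ s = "DISCORD_SERVER") ∨
    (pvPrio s = 3 ∧ (s = "WEB_FETCH" ∨ s = "WEB_READ")) ∨
    (pvPrio s = 4 ∧ s = "VOICE_AUDIO") ∨
    (pvPrio s = 5 ∧ s = "MCP") := by
  unfold pvPrio; split_ifs <;> simp_all

theorem pvPrio_ne_of_seven {s : String} (h : pvPrio s = 7) :
    s ≠ "MEDIA_ANALYZE" ∧ s ≠ "CODEBASE" ∧ s ≠ "DISCORD_SERVER" ∧ s ≠ "WEB_FETCH" ∧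
    s ≠ "WEB_READ" ∧ s ≠ "VOICE_AUDIO" ∧ s ≠ "MCP" := by
  refine ⟨?_, ?_, ?_, ?_, ?_, ?_, ?_⟩ <;>
    (intro e; rw [e] at h; exact absurd h (by decide))

-- the dictionary lookup, characterized via pvPrio / pvLbl
theorem get_pvPriorityDict (s : String) :
    pvPriorityDict.get? s =
      if pvPrio s = 7 then none else some (pvPrio s, pvLbl (pvPrio s)) := by
  rcases pvPrio_cases s with h | ⟨h, rfl⟩ | ⟨h, rfl⟩ | ⟨h, rfl⟩ | ⟨h, rfl | rfl⟩ | ⟨h, rfl⟩ | ⟨h, rfl⟩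
  · obtain ⟨n1, n2, n3, n4, n5, n6, n7⟩ := pvPrio_ne_of_seven h
    rw [if_pos h]
    unfold pvPriorityDict
    simp only [PySem.Dict.get?_mk_cons, beq_iff_eq]
    rw [if_neg (Ne.symm n1), if_neg (Ne.symm n2), if_neg (Ne.symm n3),
      if_neg (Ne.symm n4), if_neg (Ne.symm n5), if_neg (Ne.symm n6), if_neg (Ne.symm n7)]
    simp [PySem.Dict.get?]
  all_goals decide

def pvMinFold (p : Int) (l : List String) : Int :=
  l.foldl (fun a s => min a (pvPrio s)) p

theorem pvMinFold_le_init (l : List String) (p : Int) : pvMinFold p l ≤ p := by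
  induction l generalizing p with
  | nil => simp [pvMinFold]
  | cons y l ih =>
    calc pvMinFold p (y :: l) = pvMinFold (min p (pvPrio y)) l := rfl
    _ ≤ min p (pvPrio y) := ih _
    _ ≤ p := min_le_left _ _

theorem pvMinFold_le_mem (l : List String) (p : Int) (x : String) (hx : x ∈ l) :
    pvMinFold p l ≤ pvPrio x := by
  induction l generalizing p with
  | nil => cases hx
  | cons y l ih =>
    rcases List.mem_cons.mp hx with rfl | hx'
    · calc pvMinFold p (x :: l) = pvMinFold (min p (pvPrio x)) l := rfl
        _ ≤ min p (pvPrio x) := pvMinFold_le_init _ _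
        _ ≤ pvPrio x := min_le_right _ _
    · exact ih _ hx'

theorem pvMinFold_nonneg (l : List String) (p : Int) (hp : 0 ≤ p) :
    0 ≤ pvMinFold p l := by
  induction l generalizing p with
  | nil => simpa [pvMinFold] using hp
  | cons y l ih => exact ih _ (le_min hp (pvPrio_bounds y).1)

theorem pvMinFold_attained (l : List String) (p : Int) :
    pvMinFold p l = p ∨ ∃ x ∈ l, pvPrio x = pvMinFold p l := by
  induction l generalizing p with
  | nil => left; rfl
  | cons y l ih =>
    rcases ih (min p (pvPrio y)) with h | ⟨x, hx, hpx⟩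
    · rcases le_total p (pvPrio y) with hle | hle
      · left
        calc pvMinFold p (y :: l) = pvMinFold (min p (pvPrio y)) l := rfl
          _ = min p (pvPrio y) := h
          _ = p := min_eq_left hle
      · right
        refine ⟨y, List.mem_cons_self, ?_⟩
        calc pvPrio y = min p (pvPrio y) := (min_eq_right hle).symm
          _ = pvMinFold (min p (pvPrio y)) l := h.symm
          _ = pvMinFold p (y :: l) := rfl
    · right; exact ⟨x, List.mem_cons_of_mem _ hx, hpx⟩

-- B's loop step, on an already-normalized string
def pvStep (best : Int × String) (s : String) : Int × String :=
  match pvPriorityDict.get? s with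
  | none => best
  | some hit => if hit.1 < best.1 then hit else best

theorem pvStep_eq (p : Int) (s : String) (h0 : 0 ≤ p) (h7 : p ≤ 7) :
    pvStep (p, pvLbl p) s = (min p (pvPrio s), pvLbl (min p (pvPrio s))) := by
  have hb := pvPrio_bounds s
  unfold pvStep
  rw [get_pvPriorityDict]
  by_cases hy7 : pvPrio s = 7
  · rw [if_pos hy7]
    rw [min_eq_left (by omega)]
  · rw [if_neg hy7]
    by_cases hlt : pvPrio s < p
    · simp only [if_pos hlt]
      rw [min_eq_right (le_of_lt hlt)]
    · simp only [if_neg hlt]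
      rw [min_eq_left (by omega)]

-- B's fold invariant: the accumulator is the minimum priority seen, with its label
theorem foldB_inv (l : List String) (p : Int) (h0 : 0 ≤ p) (h7 : p ≤ 7) :
    l.foldl pvStep (p, pvLbl p) = (pvMinFold p l, pvLbl (pvMinFold p l)) := by
  induction l generalizing p with
  | nil => rfl
  | cons y l ih =>
    have hy := pvPrio_bounds y
    calc (y :: l).foldl pvStep (p, pvLbl p)
        = l.foldl pvStep (pvStep (p, pvLbl p) y) := List.foldl_cons ..
      _ = l.foldl pvStep (min p (pvPrio y), pvLbl (min p (pvPrio y))) := by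
          rw [pvStep_eq p y h0 h7]
      _ = (pvMinFold (min p (pvPrio y)) l, pvLbl (pvMinFold (min p (pvPrio y)) l)) :=
          ih _ (le_min h0 hy.1) (le_trans (min_le_left _ _) h7)
      _ = (pvMinFold p (y :: l), pvLbl (pvMinFold p (y :: l))) := rfl

-- A's chain, characterized via the minimum priority over the (normalized) list
theorem chainA_eq (cats : List String) :
    (if cats.contains "MEDIA_ANALYZE" then "vision"
     else if cats.contains "CODEBASE" then "coding"
     else if cats.contains "DISCORD_SERVER" then "admin"
     else if cats.contains "WEB_FETCH" || cats.contains "WEB_READ" then "retrieval"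
     else if cats.contains "VOICE_AUDIO" then "voice"
     else if cats.contains "MCP" then "ops"
     else "chat")
    = pvLbl (pvMinFold 7 cats) := by
  have hnn : 0 ≤ pvMinFold 7 cats := pvMinFold_nonneg cats 7 (by norm_num)
  have hle7 : pvMinFold 7 cats ≤ 7 := pvMinFold_le_init cats 7
  have hmem : ∀ x ∈ cats, pvMinFold 7 cats ≤ pvPrio x := fun x hx =>
    pvMinFold_le_mem cats 7 x hx
  by_cases h0 : "MEDIA_ANALYZE" ∈ cats
  · have : pvMinFold 7 cats = 0 := by
      have := hmem _ h0; rw [show pvPrio "MEDIA_ANALYZE" = 0 from by decide] at this; omega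
    simp [h0, this, pvLbl]
  · by_cases h1 : "CODEBASE" ∈ cats
    · have hub := hmem _ h1
      rw [show pvPrio "CODEBASE" = 1 from by decide] at hub
      have hne0 : pvMinFold 7 cats ≠ 0 := by
        intro e
        rcases pvMinFold_attained cats 7 with ha | ⟨x, hx, hpx⟩
        · omega
        · rw [e] at hpx
          rcases pvPrio_cases x with hc | ⟨hc, rfl⟩ | ⟨hc, rfl⟩ | ⟨hc, rfl⟩ |
            ⟨hc, rfl | rfl⟩ | ⟨hc, rfl⟩ | ⟨hc, rfl⟩ <;> first | omega | exact h0 hx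
      have : pvMinFold 7 cats = 1 := by omega
      simp [h0, h1, this, pvLbl]
    · by_cases h2 : "DISCORD_SERVER" ∈ cats
      · have hub := hmem _ h2
        rw [show pvPrio "DISCORD_SERVER" = 2 from by decide] at hub
        have : pvMinFold 7 cats = 2 := by
          rcases pvMinFold_attained cats 7 with ha | ⟨x, hx, hpx⟩
          · omega
          · rcases pvPrio_cases x with hc | ⟨hc, rfl⟩ | ⟨hc, rfl⟩ | ⟨hc, rfl⟩ |
              ⟨hc, rfl | rfl⟩ | ⟨hc, rfl⟩ | ⟨hc, rfl⟩ <;>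
              first | omega | exact absurd hx h0 | exact absurd hx h1
        simp [h0, h1, h2, this, pvLbl]
      · by_cases h3 : "WEB_FETCH" ∈ cats ∨ "WEB_READ" ∈ cats
        · have hub : pvMinFold 7 cats ≤ 3 := by
            rcases h3 with h3 | h3
            · have := hmem _ h3
              rw [show pvPrio "WEB_FETCH" = 3 from by decide] at this; omega
            · have := hmem _ h3
              rw [show pvPrio "WEB_READ" = 3 from by decide] at this; omega
          have : pvMinFold 7 cats = 3 := by
            rcases pvMinFold_attained cats 7 with ha | ⟨x, hx, hpx⟩
            · omega
            · rcases pvPrio_cases x with hc | ⟨hc, rfl⟩ | ⟨hc, rfl⟩ | ⟨hc, rfl⟩ |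
                ⟨hc, rfl | rfl⟩ | ⟨hc, rfl⟩ | ⟨hc, rfl⟩ <;>
                first | omega | exact absurd hx h0 | exact absurd hx h1 | exact absurd hx h2
          rcases h3 with h3 | h3 <;> simp [h0, h1, h2, h3, this, pvLbl]
        · push Not at h3
          by_cases h4 : "VOICE_AUDIO" ∈ cats
          · have hub := hmem _ h4
            rw [show pvPrio "VOICE_AUDIO" = 4 from by decide] at hub
            have : pvMinFold 7 cats = 4 := by
              rcases pvMinFold_attained cats 7 with ha | ⟨x, hx, hpx⟩
              · omega
              · rcases pvPrio_cases x with hc | ⟨hc, rfl⟩ | ⟨hc, rfl⟩ | ⟨hc, rfl⟩ |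
                  ⟨hc, rfl | rfl⟩ | ⟨hc, rfl⟩ | ⟨hc, rfl⟩ <;>
                  first | omega | exact absurd hx h0 | exact absurd hx h1 |
                    exact absurd hx h2 | exact absurd hx h3.1 | exact absurd hx h3.2
            simp [h0, h1, h2, h3.1, h3.2, h4, this, pvLbl]
          · by_cases h5 : "MCP" ∈ cats
            · have hub := hmem _ h5
              rw [show pvPrio "MCP" = 5 from by decide] at hub
              have : pvMinFold 7 cats = 5 := by
                rcases pvMinFold_attained cats 7 with ha | ⟨x, hx, hpx⟩
                · omega
                · rcases pvPrio_cases x with hc | ⟨hc, rfl⟩ | ⟨hc, rfl⟩ | ⟨hc, rfl⟩ |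
                    ⟨hc, rfl | rfl⟩ | ⟨hc, rfl⟩ | ⟨hc, rfl⟩ <;>
                    first | omega | exact absurd hx h0 | exact absurd hx h1 |
                      exact absurd hx h2 | exact absurd hx h3.1 | exact absurd hx h3.2 |
                      exact absurd hx h4
              simp [h0, h1, h2, h3.1, h3.2, h4, h5, this, pvLbl]
            · have : pvMinFold 7 cats = 7 := by
                rcases pvMinFold_attained cats 7 with ha | ⟨x, hx, hpx⟩
                · exact ha
                · rcases pvPrio_cases x with hc | ⟨hc, rfl⟩ | ⟨hc, rfl⟩ | ⟨hc, rfl⟩ |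
                    ⟨hc, rfl | rfl⟩ | ⟨hc, rfl⟩ | ⟨hc, rfl⟩ <;>
                    first | omega | exact absurd hx h0 | exact absurd hx h1 |
                      exact absurd hx h2 | exact absurd hx h3.1 | exact absurd hx h3.2 |
                      exact absurd hx h4 | exact absurd hx h5
              simp [h0, h1, h2, h3.1, h3.2, h4, h5, this, pvLbl]

-- ===== VERDICT (by name: the statement is the Claim_ definition above) =====
set_option maxHeartbeats 1000000 in
theorem derive_function_category_py_spec : Claim_equal_derive_function_category_py := by
  intro sc _
  unfold Spec_derive_function_category_py
  have hB : derive_function_category_py_alt sc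
      = ((sc.map pvNorm).foldl pvStep ((7 : Int), pvLbl 7)).2 := by
    unfold derive_function_category_py_alt pvStep
    rw [List.foldl_map, show pvLbl 7 = "chat" from rfl]
  rw [hB, foldB_inv (sc.map pvNorm) 7 (by norm_num) le_rfl]
  unfold derive_function_category_py
  exact chainA_eq (sc.map pvNorm)
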